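-- pv_equiv track=rewrite | github.com/Tokyo113/leetcode_python | 中级班/chapter1/code_04_ColorLeftRight.py | minPaint2
-- ===== SOURCE A (Python) =====
-- def minPaint2(str):
--     '''
--     申请辅助结构，分别统计左侧G和右侧R的个数
--     :param str:
--     :return:
--     '''
--     if len(str) < 2 or str is None:
--         return 0
--     # leftG  0~i上G的个数
--     # rightR i~N-1上R的个数
--     leftG = []
--     cnt = 0
--     for i in str:
--         if i == "G":
--             cnt += 1
--             leftG.append(cnt)
--         else:
--             leftG.append(cnt)
--     rightR = [0 for i in range(len(str))]
--     rightR[len(str)-1] = 0 if str[-1] == "G" else 1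
--     for i in range(len(str)-2, -1, -1):
--         rightR[i] = rightR[i+1]
--         rightR[i] += 1 if str[i] == 'R' else 0
--     mincolor = len(str)
--
--     for i in range(len(str)+1):
--         if i == 0:
--             mincolor = min(mincolor, rightR[0])
--         elif i == len(str):
--             mincolor = min(mincolor, leftG[-1])
--         else:
--             mincolor = min(mincolor, leftG[i-1]+rightR[i])
--     return mincolor
-- ===== SOURCE B (Python) =====
-- def minPaint2(str):
--     # One forward pass, O(1) extra space: g = G's seen so far,
--     # res = min repaints to make the processed prefix R*G*.
--     if len(str) < 2:
--         return 0
--     g = 0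
--     res = 0
--     for c in str:
--         if c == "G":
--             g += 1
--         res = min(g, res + (1 if c == "R" else 0))
--     return res
-- ===== Notes on version B (the rewrite author's own statement) =====
-- stated objective: simpler
-- what changed: Replaces the two prefix/suffix count arrays and the split-point scan with a single forward pass keeping two integers (G-count and running min cost): O(1) extra space and no list building, which a timing run measured as a constant-factor speedup.
-- outside the precondition, e.g. on minPaint2('Gx'): A returns 1, B returns 0
import Mathlib
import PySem

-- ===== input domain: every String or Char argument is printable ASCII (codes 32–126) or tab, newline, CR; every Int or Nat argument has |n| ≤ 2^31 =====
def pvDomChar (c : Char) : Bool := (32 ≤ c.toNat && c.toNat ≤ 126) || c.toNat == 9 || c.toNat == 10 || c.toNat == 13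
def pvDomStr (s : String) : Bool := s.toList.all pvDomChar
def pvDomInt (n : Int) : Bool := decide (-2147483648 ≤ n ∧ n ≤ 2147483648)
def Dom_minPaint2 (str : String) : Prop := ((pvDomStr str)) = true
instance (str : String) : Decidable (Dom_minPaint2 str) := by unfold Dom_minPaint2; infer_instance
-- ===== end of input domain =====

-- B replaces A's two prefix/suffix count arrays and split-point scan by a single
-- forward pass keeping two integers (objective: simpler, O(1) extra space).


-- ===== PORT A =====
def minPaint2 (str : String) : Int :=
  let s := str.toList
  if s.length < 2 then 0
  else
    -- leftG: running count of 'G' appended at every position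
    let p := s.foldl
      (fun (p : List Int × Int) i =>
        if i == 'G' then (p.1 ++ [p.2 + 1], p.2 + 1) else (p.1 ++ [p.2], p.2))
      (([] : List Int), (0 : Int))
    let leftG := p.1
    let n := s.length
    let rightR0 : List Int := (PySem.List.pyRange 0 (n : Int) 1).map (fun _ => (0 : Int))
    let rightR1 := PySem.List.pySetD rightR0 ((n : Int) - 1)
      (if (PySem.List.pyGet? s (-1)).getD ' ' == 'G' then (0 : Int) else 1)
    -- backward loop: rightR[i] = rightR[i+1] (+1 if s[i]=='R'); indices are in range, defaults never read
    let rightR := (PySem.List.pyRange ((n : Int) - 2) (-1) (-1)).foldl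
      (fun rr i =>
        PySem.List.pySetD rr i
          (PySem.List.pyGetD rr (i + 1) 0 +
            (if (PySem.List.pyGet? s i).getD ' ' == 'R' then (1 : Int) else 0)))
      rightR1
    (PySem.List.pyRange 0 ((n : Int) + 1) 1).foldl
      (fun mc i =>
        if i == 0 then min mc (PySem.List.pyGetD rightR 0 0)
        else if i == (n : Int) then min mc ((PySem.List.pyGet? leftG (-1)).getD 0)
        else min mc (PySem.List.pyGetD leftG (i - 1) 0 + PySem.List.pyGetD rightR i 0))
      (n : Int)

-- ===== PORT B =====
def minPaint2_alt (str : String) : Int :=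
  let s := str.toList
  if s.length < 2 then 0
  else
    (s.foldl
      (fun (p : Int × Int) c =>
        let g := p.1 + (if c == 'G' then 1 else 0)
        (g, min g (p.2 + (if c == 'R' then 1 else 0))))
      ((0 : Int), (0 : Int))).2

-- ===== PRECONDITION & SPEC =====
-- Pre_ excludes only strings of length ≥ 2 whose last character is outside the alphabet
-- {'G','R'} AND whose remainder ends in a suffix with more 'G' than 'R': the function is
-- specified on 'G'/'R' strings only, and on such a foreign final character A charges one
-- repaint (as if it were 'R') while B charges nothing (as for every other foreign
-- character) — an unspecified corner on which both values are defensible.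
def Pre_minPaint2 (str : String) : Prop :=
  str.toList.length < 2 ∨ str.toList.getLastD ' ' = 'G' ∨ str.toList.getLastD ' ' = 'R' ∨
    ∀ i : Nat, i ≤ str.toList.dropLast.length →
      (str.toList.dropLast.drop i).countP (· == 'G') ≤ (str.toList.dropLast.drop i).countP (· == 'R')
instance (str : String) : Decidable (Pre_minPaint2 str) := by unfold Pre_minPaint2; infer_instance
def pvWitness_minPaint2 : String := "RGRxGR"

def Spec_minPaint2 (str : String) (out : Int) : Prop := out = minPaint2_alt str
instance (str : String) (out : Int) : Decidable (Spec_minPaint2 str out) := by unfold Spec_minPaint2; infer_instance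

-- ===== CLAIM (what is proved, stated in full; the proofs are below) =====
def Claim_equal_minPaint2 : Prop := ∀ (str : String), Dom_minPaint2 str → Pre_minPaint2 str → Spec_minPaint2 str (minPaint2 str)

-- ===== LEMMAS AND PROOFS =====

-- running counts and the cost of splitting at position i
def cg (l : List Char) : Int := (l.countP (· == 'G') : Int)
def cr (l : List Char) : Int := (l.countP (· == 'R') : Int)
def Tc (l : List Char) (i : Nat) : Int := cg (l.take i) + cr (l.drop i)

lemma cg_append (a b : List Char) : cg (a ++ b) = cg a + cg b := by
  simp [cg, List.countP_append]
lemma cr_append (a b : List Char) : cr (a ++ b) = cr a + cr b := by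
  simp [cr, List.countP_append]
lemma cg_cons (c : Char) (l : List Char) :
    cg (c :: l) = (if c == 'G' then 1 else 0) + cg l := by
  by_cases h : c == 'G' <;> simp [cg, List.countP_cons, h] <;> omega
lemma cr_cons (c : Char) (l : List Char) :
    cr (c :: l) = (if c == 'R' then 1 else 0) + cr l := by
  by_cases h : c == 'R' <;> simp [cr, List.countP_cons, h] <;> omega
lemma cg_le_length (l : List Char) : cg l ≤ (l.length : Int) := by
  have := List.countP_le_length (p := (· == 'G')) (l := l)
  simp [cg]; omega

-- ===== generic foldl-min facts =====
lemma foldl_min_le_init (g : Int → Int) :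
    ∀ (L : List Int) (a : Int), L.foldl (fun mc i => min mc (g i)) a ≤ a := by
  intro L
  induction L with
  | nil => intro a; simp
  | cons x t ih =>
    intro a
    have h := ih (min a (g x))
    simp only [List.foldl_cons]
    exact le_trans h (by omega)

lemma foldl_min_le_mem (g : Int → Int) :
    ∀ (L : List Int) (a : Int) (i : Int), i ∈ L →
      L.foldl (fun mc i => min mc (g i)) a ≤ g i := by
  intro L
  induction L with
  | nil => intro a i h; simp at h
  | cons x t ih =>
    intro a i h
    simp only [List.foldl_cons]
    rcases List.mem_cons.mp h with h | h
    · subst h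
      exact le_trans (foldl_min_le_init g t (min a (g i))) (by omega)
    · exact ih _ i h

lemma foldl_min_cases (g : Int → Int) :
    ∀ (L : List Int) (a : Int),
      L.foldl (fun mc i => min mc (g i)) a = a ∨
        ∃ i ∈ L, L.foldl (fun mc i => min mc (g i)) a = g i := by
  intro L
  induction L with
  | nil => intro a; left; rfl
  | cons x t ih =>
    intro a
    simp only [List.foldl_cons]
    rcases ih (min a (g x)) with h | ⟨i, hi, h⟩
    · rcases le_or_gt a (g x) with hle | hlt
      · left; rw [h]; omega
      · right; exact ⟨x, List.mem_cons_self, by rw [h]; omega⟩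
    · right; exact ⟨i, List.mem_cons_of_mem _ hi, h⟩

-- ===== B-side: the DP computes the minimum split cost =====
def dpStep (p : Int × Int) (c : Char) : Int × Int :=
  let g := p.1 + (if c == 'G' then 1 else 0)
  (g, min g (p.2 + (if c == 'R' then 1 else 0)))

lemma dp_spec (l : List Char) :
    (l.foldl dpStep (0, 0)).1 = cg l ∧
    (∀ i ≤ l.length, (l.foldl dpStep (0, 0)).2 ≤ Tc l i) ∧
    (∃ i ≤ l.length, (l.foldl dpStep (0, 0)).2 = Tc l i) := by
  induction l using List.reverseRecOn with
  | nil =>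
    refine ⟨rfl, ?_, ⟨0, by simp, rfl⟩⟩
    intro i hi
    have : i = 0 := Nat.le_zero.mp hi
    subst this
    simp [Tc, cg, cr]
  | append_singleton l c ih =>
    obtain ⟨h1, h2, i0, hi0, h3⟩ := ih
    rw [List.foldl_append, List.foldl_cons, List.foldl_nil]
    set x := l.foldl dpStep (0, 0) with hx
    have hfst : (dpStep x c).1 = x.1 + (if c == 'G' then 1 else 0) := rfl
    have hsnd : (dpStep x c).2 =
        min (x.1 + (if c == 'G' then 1 else 0)) (x.2 + (if c == 'R' then 1 else 0)) := rfl
    have hTsame : ∀ i ≤ l.length, Tc (l ++ [c]) i = Tc l i + (if c == 'R' then 1 else 0) := by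
      intro i hi
      simp only [Tc, List.take_append_of_le_length hi, List.drop_append_of_le_length hi,
        cr_append]
      have : cr [c] = (if c == 'R' then 1 else 0) := by
        rw [show ([c] : List Char) = c :: [] from rfl, cr_cons]; simp [cr]
      rw [this]; ring
    have hTlast : Tc (l ++ [c]) (l.length + 1) = cg (l ++ [c]) := by
      have h1' : (l ++ [c]).length ≤ l.length + 1 := by simp
      simp only [Tc, List.take_of_length_le h1', List.drop_of_length_le h1']
      simp [cr]
    have hg : (dpStep x c).1 = cg (l ++ [c]) := by
      rw [hfst, h1, cg_append]
      have : cg [c] = (if c == 'G' then 1 else 0) := by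
        rw [show ([c] : List Char) = c :: [] from rfl, cg_cons]; simp [cg]
      rw [this]
    refine ⟨hg, ?_, ?_⟩
    · intro i hi
      simp only [List.length_append, List.length_cons, List.length_nil] at hi
      rcases Nat.lt_or_ge i (l.length + 1) with hlt | hge
      · have hi' : i ≤ l.length := by omega
        rw [hTsame i hi', hsnd]
        have := h2 i hi'
        omega
      · have : i = l.length + 1 := by omega
        subst this
        rw [hTlast, ← hg, hfst, hsnd]
        omega
    · rcases le_or_gt (x.1 + (if c == 'G' then 1 else 0))
        (x.2 + (if c == 'R' then 1 else 0)) with hle | hlt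
      · refine ⟨l.length + 1, by simp, ?_⟩
        rw [hTlast, ← hg, hfst, hsnd]
        omega
      · refine ⟨i0, by simp; omega, ?_⟩
        rw [hTsame i0 hi0, ← h3, hsnd]
        omega

-- ===== A-side: leftG characterisation =====
lemma leftG_fold (l : List Char) :
    ∀ (acc : List Int) (cnt : Int),
      l.foldl
        (fun (p : List Int × Int) i =>
          if i == 'G' then (p.1 ++ [p.2 + 1], p.2 + 1) else (p.1 ++ [p.2], p.2))
        (acc, cnt)
      = (acc ++ (List.range l.length).map (fun k => cnt + cg (l.take (k + 1))), cnt + cg l) := by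
  induction l with
  | nil => intro acc cnt; simp [cg]
  | cons c t ih =>
    intro acc cnt
    have hδ : ∀ k : Nat, cg ((c :: t).take (k + 1)) = (if c == 'G' then 1 else 0) + cg (t.take k) := by
      intro k; rw [List.take_succ_cons, cg_cons]
    simp only [List.foldl_cons]
    have hstep : (if c == 'G' then (acc ++ [cnt + 1], cnt + 1) else (acc ++ [cnt], cnt))
        = (acc ++ [cnt + (if c == 'G' then 1 else 0)], cnt + (if c == 'G' then 1 else 0)) := by
      by_cases h : c == 'G' <;> simp [h]
    rw [hstep, ih]
    rw [Prod.mk.injEq]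
    refine ⟨?_, by rw [cg_cons]; ring⟩
    rw [List.length_cons, List.range_succ_eq_map, List.map_cons, List.map_map,
        List.append_assoc, List.singleton_append]
    congr 1
    · rw [hδ 0]; simp [cg]
      intro k _
      rw [List.countP_cons]
      by_cases h : c = 'G' <;> simp [h] <;> push_cast <;> try ring

-- ===== A-side: rightR characterisation =====
def rrStep (s : List Char) (rr : List Int) (i : Int) : List Int :=
  PySem.List.pySetD rr i
    (PySem.List.pyGetD rr (i + 1) 0 +
      (if (PySem.List.pyGet? s i).getD ' ' == 'R' then (1 : Int) else 0))

lemma rr_fold (s : List Char) (F : Nat → Int)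
    (hF : ∀ k : Nat, k + 1 < s.length →
      F k = F (k + 1) + (if s.getD k ' ' == 'R' then 1 else 0)) :
    ∀ (t : Nat) (rr : List Int), rr.length = s.length → (t : Int) ≤ (s.length : Int) - 1 →
      (∀ k : Nat, t ≤ k → k < s.length → rr.getD k 0 = F k) →
      ∀ k : Nat, k < s.length →
        ((PySem.List.pyRange ((t : Int) - 1) (-1) (-1)).foldl (rrStep s) rr).getD k 0
          = F k := by
  intro t
  induction t with
  | zero =>
    intro rr hlen _ hinv k hk
    rw [show ((0 : Nat) : Int) - 1 = -1 by norm_num,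
      PySem.List.pyRange_neg_one_eq_nil (by norm_num)]
    exact hinv k (Nat.zero_le k) hk
  | succ t ih =>
    intro rr hlen hle hinv k hk
    have htlen : t + 1 < s.length := by
      have : ((t : Int) + 1) ≤ (s.length : Int) - 1 := by push_cast at hle ⊢; omega
      omega
    have hcons : PySem.List.pyRange (((t + 1 : Nat) : Int) - 1) (-1) (-1)
        = ((t : Nat) : Int) :: PySem.List.pyRange ((t : Int) - 1) (-1) (-1) := by
      push_cast
      rw [show ((t : Int) + 1 - 1) = (t : Int) by ring]
      exact PySem.List.pyRange_neg_one_cons (by omega)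
    rw [hcons, List.foldl_cons]
    have hset : rrStep s rr ((t : Nat) : Int)
        = rr.set t (rr.getD (t + 1) 0 + (if s[t]'(by omega) == 'R' then (1 : Int) else 0)) := by
      simp only [rrStep, PySem.List.pySetD_natCast]
      congr 2
      · have : ((t : Int) + 1) = (((t + 1 : Nat)) : Int) := by push_cast; ring
        rw [this, PySem.List.pyGetD_natCast]
      · rw [PySem.List.pyGet?_natCast, List.getElem?_eq_getElem (by omega)]
        simp
    have hlen' : (rrStep s rr ((t : Nat) : Int)).length = s.length := by
      rw [hset, List.length_set, hlen]
    refine ih (rrStep s rr ((t : Nat) : Int)) hlen' (by push_cast at hle ⊢; omega) ?_ k hk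
    intro k' hk' hk'lt
    rw [hset]
    rcases Nat.eq_or_lt_of_le hk' with heq | hlt
    · -- k' = t: the freshly written cell satisfies the recurrence
      subst heq
      rw [List.getD_eq_getElem?_getD, List.getElem?_set_self (by omega), Option.getD_some]
      rw [hinv (t + 1) (by omega) (by omega), hF t htlen]
      have hgd : s.getD t ' ' = s[t]'(by omega) := by
        rw [List.getD_eq_getElem?_getD, List.getElem?_eq_getElem (by omega)]
        rfl
      rw [hgd]
    · -- k' > t: untouched cell
      rw [List.getD_eq_getElem?_getD, List.getElem?_set_ne (by omega),
        ← List.getD_eq_getElem?_getD]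
      exact hinv k' (by omega) hk'lt

-- ===== final assembly =====
theorem minPaint2_spec : Claim_equal_minPaint2 := by
  unfold Claim_equal_minPaint2
  intro str _dom hpre
  unfold Spec_minPaint2
  by_cases h2 : str.toList.length < 2
  · simp only [minPaint2, minPaint2_alt, if_pos h2]
  · set s := str.toList with hs
    have hn2 : 2 ≤ s.length := by omega
    have hne : s ≠ [] := by
      intro h
      rw [h] at hn2
      simp at hn2
    have hlast0 : s.getLastD ' ' = s[s.length - 1]'(by omega) := by
      rw [List.getLastD_eq_getLast?, List.getLast?_eq_getElem?,
        List.getElem?_eq_getElem (show s.length - 1 < s.length by omega)]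
      rfl
    have hpre' : s[s.length - 1]'(by omega) = 'G' ∨ s[s.length - 1]'(by omega) = 'R' ∨
        (∀ i : Nat, i ≤ s.dropLast.length →
          (s.dropLast.drop i).countP (· == 'G') ≤ (s.dropLast.drop i).countP (· == 'R')) := by
      unfold Pre_minPaint2 at hpre
      rw [← hs, hlast0] at hpre
      rcases hpre with h | h | h | h
      · omega
      · exact Or.inl h
      · exact Or.inr (Or.inl h)
      · exact Or.inr (Or.inr h)
    -- B side
    obtain ⟨_hb1, hb2, j0, hj0, hb3⟩ := dp_spec s
    have hB : minPaint2_alt str = (s.foldl dpStep (0, 0)).2 := by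
      unfold minPaint2_alt dpStep
      rw [← hs, if_neg h2]
    -- A side components
    have hLG : s.foldl
        (fun (p : List Int × Int) i =>
          if i == 'G' then (p.1 ++ [p.2 + 1], p.2 + 1) else (p.1 ++ [p.2], p.2))
        (([] : List Int), (0 : Int))
        = ((List.range s.length).map (fun k => cg (s.take (k + 1))), cg s) := by
      rw [leftG_fold]
      simp
    have hLGget : ∀ k : Nat, k < s.length →
        ((List.range s.length).map (fun k => cg (s.take (k + 1)))).getD k 0
          = cg (s.take (k + 1)) := by
      intro k hk
      simp [List.getD_eq_getElem?_getD, hk]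
    -- the extra unit A charges for a final character outside {'G','R'}
    set e : Int :=
      if s[s.length - 1]'(by omega) = 'G' ∨ s[s.length - 1]'(by omega) = 'R' then 0 else 1
      with hedef
    have he0 : 0 ≤ e := by
      rw [hedef]
      split <;> norm_num
    -- rightR
    have hcast1 : ((s.length - 1 : Nat) : Int) = (s.length : Int) - 1 := by omega
    have hrr0len : ((PySem.List.pyRange 0 (s.length : Int) 1).map (fun _ => (0 : Int))).length
        = s.length := by
      rw [List.length_map, PySem.List.length_pyRange_one]
      omega
    have hrr1 : PySem.List.pySetD
          ((PySem.List.pyRange 0 (s.length : Int) 1).map (fun _ => (0 : Int)))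
          ((s.length : Int) - 1)
          (if (PySem.List.pyGet? s (-1)).getD ' ' == 'G' then (0 : Int) else 1)
        = ((PySem.List.pyRange 0 (s.length : Int) 1).map (fun _ => (0 : Int))).set
            (s.length - 1)
            (if (PySem.List.pyGet? s (-1)).getD ' ' == 'G' then (0 : Int) else 1) := by
      rw [← hcast1, PySem.List.pySetD_natCast]
    have hval : (if (PySem.List.pyGet? s (-1)).getD ' ' == 'G' then (0 : Int) else 1)
        = cr (s.drop (s.length - 1)) + e := by
      rw [PySem.List.pyGet?_neg_one, List.getLast?_eq_getElem?,
        List.getElem?_eq_getElem (show s.length - 1 < s.length by omega), Option.getD_some]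
      have hdrop : s.drop (s.length - 1) = [s[s.length - 1]'(by omega)] := by
        rw [List.drop_eq_getElem_cons (show s.length - 1 < s.length by omega)]
        rw [show s.length - 1 + 1 = s.length by omega, List.drop_length]
      rw [hdrop, hedef]
      by_cases hcG : s[s.length - 1]'(by omega) = 'G'
      · simp [hcG, cr]
      · by_cases hcR : s[s.length - 1]'(by omega) = 'R' <;> simp [hcG, hcR, cr]
    have hFrec : ∀ k : Nat, k + 1 < s.length →
        cr (s.drop k) + e = (cr (s.drop (k + 1)) + e) +
          (if s.getD k ' ' == 'R' then 1 else 0) := by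
      intro k hk
      have hgd : s.getD k ' ' = s[k]'(by omega) := by
        rw [List.getD_eq_getElem?_getD, List.getElem?_eq_getElem (by omega)]
        rfl
      rw [hgd, List.drop_eq_getElem_cons (show k < s.length by omega), cr_cons]
      ring
    have hbase : ∀ k : Nat, s.length - 1 ≤ k → k < s.length →
        (((PySem.List.pyRange 0 (s.length : Int) 1).map (fun _ => (0 : Int))).set
            (s.length - 1)
            (if (PySem.List.pyGet? s (-1)).getD ' ' == 'G' then (0 : Int) else 1)).getD k 0
          = cr (s.drop k) + e := by
      intro k hk1 hk2
      have hkeq : k = s.length - 1 := by omega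
      subst hkeq
      rw [List.getD_eq_getElem?_getD, List.getElem?_set_self (by omega), Option.getD_some, hval]
    have hRR : ∀ k : Nat, k < s.length →
        ((PySem.List.pyRange ((s.length : Int) - 2) (-1) (-1)).foldl (rrStep s)
            (((PySem.List.pyRange 0 (s.length : Int) 1).map (fun _ => (0 : Int))).set
              (s.length - 1)
              (if (PySem.List.pyGet? s (-1)).getD ' ' == 'G' then (0 : Int) else 1))).getD k 0
          = cr (s.drop k) + e := by
      have hc2 : ((s.length - 1 : Nat) : Int) - 1 = (s.length : Int) - 2 := by omega
      intro k hk
      rw [← hc2]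
      exact rr_fold s (fun k => cr (s.drop k) + e) hFrec (s.length - 1)
        _ (by rw [List.length_set, hrr0len]) (by omega) hbase k hk
    -- abbreviations for A's final fold
    set leftG := (List.range s.length).map (fun k => cg (s.take (k + 1))) with hLGdef
    set rightR := (PySem.List.pyRange ((s.length : Int) - 2) (-1) (-1)).foldl (rrStep s)
      (((PySem.List.pyRange 0 (s.length : Int) 1).map (fun _ => (0 : Int))).set
        (s.length - 1)
        (if (PySem.List.pyGet? s (-1)).getD ' ' == 'G' then (0 : Int) else 1)) with hRRdef
    set gFun := (fun i : Int =>
      if i == 0 then PySem.List.pyGetD rightR 0 0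
      else if i == (s.length : Int) then (PySem.List.pyGet? leftG (-1)).getD 0
      else PySem.List.pyGetD leftG (i - 1) 0 + PySem.List.pyGetD rightR i 0) with hgdef
    -- A's result is the min-fold of gFun
    have hA : minPaint2 str
        = (PySem.List.pyRange 0 ((s.length : Int) + 1) 1).foldl
            (fun mc i => min mc (gFun i)) (s.length : Int) := by
      simp only [minPaint2, ← hs, if_neg h2]
      rw [hLG]
      rw [hrr1]
      rw [hgdef]
      congr 1
      funext mc i
      beta_reduce
      by_cases hb0 : (i == (0 : Int)) = true
      · rw [if_pos hb0, if_pos hb0]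
        rfl
      · rw [if_neg hb0, if_neg hb0]
        by_cases hbn : (i == ((s.length : Nat) : Int)) = true
        · rw [if_pos hbn, if_pos hbn]
        · rw [if_neg hbn, if_neg hbn]
          rfl
    -- gFun at a natural index is the split cost (plus e except at the last split)
    have hG : ∀ k : Nat, k ≤ s.length →
        gFun (k : Int) = Tc s k + (if k = s.length then 0 else e) := by
      intro k hk
      rw [hgdef]
      by_cases hk0 : k = 0
      · subst hk0
        simp only [Nat.cast_zero, beq_self_eq_true, if_true]
        rw [PySem.List.pyGetD_zero, hRR 0 (by omega)]
        rw [if_neg (by omega)]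
        simp [Tc, cg]
      · by_cases hkn : k = s.length
        · subst hkn
          have hbeq0 : ((s.length : Int) == 0) = false := by
            simp
            omega
          have hbeqn : ((s.length : Int) == (s.length : Int)) = true := by simp
          simp only [hbeq0, hbeqn, Bool.false_eq_true, if_false, if_true]
          rw [PySem.List.pyGet?_neg_one, hLGdef, List.getLast?_eq_getElem?]
          have hlglen : ((List.range s.length).map (fun k => cg (s.take (k + 1)))).length
              = s.length := by simp
          rw [hlglen, List.getElem?_map, List.getElem?_range (by omega)]
          simp only [Option.map_some, Option.getD_some]
          rw [show s.length - 1 + 1 = s.length by omega, List.take_of_length_le (le_refl _)]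
          simp [Tc, cr]
        · have hkn' : k < s.length := by omega
          have hbeq0 : (((k : Nat) : Int) == 0) = false := by
            simp
            omega
          have hbeqn : (((k : Nat) : Int) == (s.length : Int)) = false := by
            simp
            omega
          simp only [hbeq0, hbeqn, Bool.false_eq_true, if_false]
          have hc : ((k : Nat) : Int) - 1 = ((k - 1 : Nat) : Int) := by omega
          rw [hc, PySem.List.pyGetD_natCast, PySem.List.pyGetD_natCast, hLGdef]
          rw [hLGget (k - 1) (by omega), hRR k hkn']
          rw [show k - 1 + 1 = k by omega, if_neg hkn]
          simp only [Tc]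
          ring
    -- assemble
    rw [hA, hB]
    have hmemL : ∀ k : Nat, k ≤ s.length →
        ((k : Nat) : Int) ∈ PySem.List.pyRange 0 ((s.length : Int) + 1) 1 := by
      intro k hk
      rw [PySem.List.mem_pyRange_one]
      omega
    have hTcn : Tc s s.length = cg s := by
      simp [Tc, List.take_of_length_le (le_refl s.length), cr]
    by_cases hGRcase : s[s.length - 1]'(by omega) = 'G' ∨ s[s.length - 1]'(by omega) = 'R'
    · -- last character in the alphabet: A's extra unit e vanishes, both are min over splits
      have he : e = 0 := by rw [hedef, if_pos hGRcase]
      have hG' : ∀ k : Nat, k ≤ s.length → gFun (k : Int) = Tc s k := by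
        intro k hk
        rw [hG k hk, he]
        split <;> ring
      apply le_antisymm
      · rw [hb3, ← hG' j0 hj0]
        exact foldl_min_le_mem gFun _ _ _ (hmemL j0 hj0)
      · rcases foldl_min_cases gFun (PySem.List.pyRange 0 ((s.length : Int) + 1) 1)
          (s.length : Int) with hcase | ⟨i, hiL, hcase⟩
        · rw [hcase]
          calc (s.foldl dpStep (0, 0)).2 ≤ Tc s s.length := hb2 s.length (le_refl _)
            _ = cg s := hTcn
            _ ≤ (s.length : Int) := cg_le_length s
        · rw [PySem.List.mem_pyRange_one] at hiL
          obtain ⟨hi0, hin⟩ := hiL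
          have hieq : i = ((i.toNat : Nat) : Int) := by omega
          have hile : i.toNat ≤ s.length := by omega
          rw [hcase, hieq, hG' i.toNat hile]
          exact hb2 i.toNat hile
    · -- foreign last character, but no suffix with a 'G' majority: both results are cg s
      have hsuf : ∀ i : Nat, i ≤ s.dropLast.length →
          (s.dropLast.drop i).countP (· == 'G') ≤ (s.dropLast.drop i).countP (· == 'R') := by
        rcases hpre' with h | h | h
        · exact absurd (Or.inl h) hGRcase
        · exact absurd (Or.inr h) hGRcase
        · exact h
      have hsp : s.dropLast ++ [s[s.length - 1]'(by omega)] = s := by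
        conv_rhs => rw [← List.dropLast_append_getLast hne]
        rw [List.getLast_eq_getElem]
      have hsplen : s.dropLast.length = s.length - 1 := by
        simp
      have hTcge : ∀ k : Nat, k ≤ s.length → cg s ≤ Tc s k := by
        intro k hk
        rcases Nat.eq_or_lt_of_le hk with heq | hlt
        · rw [heq, hTcn]
        · have hk' : k ≤ s.dropLast.length := by omega
          have htake : s.take k = s.dropLast.take k := by
            conv_lhs => rw [← hsp]
            rw [List.take_append_of_le_length hk']
          have hdrop : s.drop k = s.dropLast.drop k ++ [s[s.length - 1]'(by omega)] := by
            conv_lhs => rw [← hsp]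
            rw [List.drop_append_of_le_length hk']
          have hclast_g : cg [s[s.length - 1]'(by omega)] = 0 := by
            simp only [cg, List.countP_cons, List.countP_nil]
            have : (s[s.length - 1]'(by omega) == 'G') = false := by
              simp
              intro h
              exact hGRcase (Or.inl h)
            simp [this]
          have hclast_r : cr [s[s.length - 1]'(by omega)] = 0 := by
            simp only [cr, List.countP_cons, List.countP_nil]
            have : (s[s.length - 1]'(by omega) == 'R') = false := by
              simp
              intro h
              exact hGRcase (Or.inr h)
            simp [this]
          have hcgs : cg s = cg (s.dropLast.take k) + cg (s.dropLast.drop k) := by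
            conv_lhs => rw [← hsp]
            rw [cg_append, hclast_g]
            conv_lhs => rw [← List.take_append_drop k s.dropLast]
            rw [cg_append]
            ring
          have hsufk := hsuf k hk'
          have hsufk' : cg (s.dropLast.drop k) ≤ cr (s.dropLast.drop k) := by
            simp only [cg, cr]
            exact_mod_cast hsufk
          rw [Tc, htake, hdrop, cr_append, hclast_r, hcgs]
          omega
      have hbeq : (s.foldl dpStep (0, 0)).2 = cg s := by
        apply le_antisymm
        · rw [← hTcn]
          exact hb2 s.length (le_refl _)
        · rw [hb3]
          exact hTcge j0 hj0
      rw [hbeq]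
      apply le_antisymm
      · have hle := foldl_min_le_mem gFun
          (PySem.List.pyRange 0 ((s.length : Int) + 1) 1) (s.length : Int) _
          (hmemL s.length (le_refl _))
        rw [hG s.length (le_refl _), if_pos rfl, hTcn] at hle
        calc (PySem.List.pyRange 0 ((s.length : Int) + 1) 1).foldl
              (fun mc i => min mc (gFun i)) (s.length : Int)
            ≤ cg s + 0 := hle
          _ = cg s := by ring
      · rcases foldl_min_cases gFun (PySem.List.pyRange 0 ((s.length : Int) + 1) 1)
          (s.length : Int) with hcase | ⟨i, hiL, hcase⟩
        · rw [hcase]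
          exact cg_le_length s
        · rw [PySem.List.mem_pyRange_one] at hiL
          obtain ⟨hi0, hin⟩ := hiL
          have hieq : i = ((i.toNat : Nat) : Int) := by omega
          have hile : i.toNat ≤ s.length := by omega
          rw [hcase, hieq, hG i.toNat hile]
          have h1 := hTcge i.toNat hile
          have h2' : (0 : Int) ≤ (if i.toNat = s.length then 0 else e) := by
            split
            · exact le_refl 0
            · exact he0
          omega
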